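-- pv_equiv track=rewrite | github.com/benjello/conversion_precis_ipp | quarto/tex2qmd/fiscalite.py | _replace_table_block_by_id
-- ===== SOURCE A (Python) =====
-- def _replace_table_block_by_id(content: str, table_id: str, replacement: str) -> str:
--     lines = content.splitlines()
--     out: list[str] = []
--     i = 0
--     while i < len(lines):
--         line = lines[i]
--         if line.startswith("::: tab") or line.startswith(":::: tab"):
--             j = i + 1
--             while j < len(lines) and lines[j].strip() not in (":::", "::::"):
--                 j += 1
--             if j < len(lines):
--                 block_lines = lines[i : j + 1]
--                 block_text = "\n".join(block_lines)
--                 if table_id in block_text: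
--                     out.append(replacement.rstrip("\n"))
--                 else:
--                     out.extend(block_lines)
--                 i = j + 1
--                 continue
--         out.append(line)
--         i += 1
--     return "\n".join(out)
-- ===== SOURCE B (Python) =====
-- def _replace_table_block_by_id(content: str, table_id: str, replacement: str) -> str:
--     out: list[str] = []
--     buf = None  # pending lines of an open ":::(:) tab" block, or None
--     for line in content.splitlines():
--         if buf is None:
--             if line.startswith("::: tab") or line.startswith(":::: tab"):
--                 buf = [line]
--             else:
--                 out.append(line)
--         elif line.strip() in (":::", "::::"):
--             buf.append(line)
--             if table_id in "\n".join(buf):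
--                 out.append(replacement.rstrip("\n"))
--             else:
--                 out.extend(buf)
--             buf = None
--         else:
--             buf.append(line)
--     if buf is not None:
--         out.extend(buf)  # unclosed block: A also emits these lines verbatim
--     return "\n".join(out)
-- ===== Notes on version B (the rewrite author's own statement) =====
-- stated objective: alternative
-- what changed: Replaces A's index-cursor loop, which scans ahead with an inner while for the closing fence and re-starts after unclosed openings, by a single forward pass that buffers pending block lines and flushes the buffer at the first closing fence (or verbatim at end of input).
import Mathlib
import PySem

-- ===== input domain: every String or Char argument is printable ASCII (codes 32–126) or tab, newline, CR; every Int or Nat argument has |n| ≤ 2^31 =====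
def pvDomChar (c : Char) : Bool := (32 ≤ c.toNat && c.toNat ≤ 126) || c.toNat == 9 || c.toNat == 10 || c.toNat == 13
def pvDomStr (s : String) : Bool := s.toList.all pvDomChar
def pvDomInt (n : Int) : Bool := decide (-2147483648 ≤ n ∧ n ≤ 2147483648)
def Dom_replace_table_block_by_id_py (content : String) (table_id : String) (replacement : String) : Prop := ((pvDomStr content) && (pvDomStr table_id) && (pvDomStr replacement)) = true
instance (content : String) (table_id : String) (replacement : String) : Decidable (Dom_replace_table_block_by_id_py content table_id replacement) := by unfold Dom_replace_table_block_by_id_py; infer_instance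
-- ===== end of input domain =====

-- B replaces A's index-cursor loop (which scans ahead with an inner while for the closing fence and
-- re-starts after unclosed openings) by a single forward pass with a buffer of pending block lines
-- (objective: alternative decomposition, one traversal). Return values only; nothing is mutated.

-- ===== PORT A =====
-- transliterations of Python expressions that appear verbatim in BOTH sources:
-- line.startswith("::: tab") or line.startswith(":::: tab")
def pvOpensTab (l : String) : Bool :=
  PySem.Str.startswith l "::: tab" || PySem.Str.startswith l ":::: tab"

-- line.strip() in (":::", "::::")
def pvIsClose (l : String) : Bool :=
  PySem.Str.strip l == ":::" || PySem.Str.strip l == "::::"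

-- hand port of replacement.rstrip("\n") (PySem has no chars-argument rstrip): drop the
-- trailing '\n' characters; exact, since the stripped set is the single character '\n'.
def pvRstripNL (s : String) : String :=
  String.ofList ((s.toList.reverse.dropWhile (fun c => c == '\n')).reverse)

-- A's inner `while j < len(lines) and lines[j].strip() not in (":::", "::::"): j += 1`.
-- `fuel` only makes the loop structurally recursive; fuel = lines.length always suffices
-- since j increases and the loop stops at j = lines.length.
def pvFindCloseA (lines : List String) (fuel : Nat) (j : Nat) : Nat :=
  match fuel with
  | 0 => j
  | Nat.succ fuel =>
    if h : j < lines.length then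
      if pvIsClose lines[j] then j else pvFindCloseA lines fuel (j + 1)
    else j

-- A's outer `while i < len(lines)` over the cursor i, accumulating `out`; same fuel device
-- (i strictly increases each iteration, so fuel = lines.length suffices).
def pvLoopA (table_id replacement : String) (lines : List String) (fuel : Nat) (i : Nat)
    (out : List String) : List String :=
  match fuel with
  | 0 => out
  | Nat.succ fuel =>
    if h : i < lines.length then
      let line := lines[i]
      if pvOpensTab line then
        let j := pvFindCloseA lines lines.length (i + 1)
        if hj : j < lines.length then
          let block := PySem.List.slice lines (some (i : Int)) (some ((j : Int) + 1))  -- lines[i : j+1]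
          let block_text := PySem.Str.join "\n" block
          if PySem.Str.isIn table_id block_text then
            pvLoopA table_id replacement lines fuel (j + 1) (out ++ [pvRstripNL replacement])
          else
            pvLoopA table_id replacement lines fuel (j + 1) (out ++ block)
        else
          pvLoopA table_id replacement lines fuel (i + 1) (out ++ [line])
      else
        pvLoopA table_id replacement lines fuel (i + 1) (out ++ [line])
    else out

def replace_table_block_by_id_py (content : String) (table_id : String) (replacement : String) : String :=
  let lines := PySem.Str.splitlines content
  PySem.Str.join "\n" (pvLoopA table_id replacement lines lines.length 0 [])

-- ===== PORT B =====
-- B's single for-loop over the lines: `buf` is None outside a block, the pending lines inside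
def pvLoopB (table_id replacement : String) :
    List String → Option (List String) → List String → List String
  | [], none, out => out
  | [], some buf, out => out ++ buf            -- unclosed block flushed verbatim at the end
  | line :: rest, none, out =>
      if pvOpensTab line then
        pvLoopB table_id replacement rest (some [line]) out
      else
        pvLoopB table_id replacement rest none (out ++ [line])
  | line :: rest, some buf, out =>
      if pvIsClose line then
        let block := buf ++ [line]
        if PySem.Str.isIn table_id (PySem.Str.join "\n" block) then
          pvLoopB table_id replacement rest none (out ++ [pvRstripNL replacement])
        else
          pvLoopB table_id replacement rest none (out ++ block)
      else
        pvLoopB table_id replacement rest (some (buf ++ [line])) out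

def replace_table_block_by_id_py_alt (content : String) (table_id : String) (replacement : String) : String :=
  PySem.Str.join "\n" (pvLoopB table_id replacement (PySem.Str.splitlines content) none [])

-- ===== PRECONDITION & SPEC =====
def Spec_replace_table_block_by_id_py (content : String) (table_id : String) (replacement : String) (out : String) : Prop := out = replace_table_block_by_id_py_alt content table_id replacement
instance (content : String) (table_id : String) (replacement : String) (out : String) : Decidable (Spec_replace_table_block_by_id_py content table_id replacement out) := by unfold Spec_replace_table_block_by_id_py; infer_instance

-- ===== CLAIM (what is proved, stated in full; the proofs are below) =====
def Claim_equal_replace_table_block_by_id_py : Prop := ∀ (content : String) (table_id : String) (replacement : String), Dom_replace_table_block_by_id_py content table_id replacement → Spec_replace_table_block_by_id_py content table_id replacement (replace_table_block_by_id_py content table_id replacement)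

-- ===== LEMMAS AND PROOFS =====

theorem pvFindCloseA_id (lines : List String) (fuel : Nat) (j : Nat)
    (hj : lines.length ≤ j) : pvFindCloseA lines fuel j = j := by
  cases fuel with
  | zero => rfl
  | succ fuel => rw [pvFindCloseA, dif_neg (by omega)]

theorem pvFindCloseA_ge (lines : List String) (fuel : Nat) (j : Nat) :
    j ≤ pvFindCloseA lines fuel j := by
  induction fuel generalizing j with
  | zero => exact le_refl j
  | succ fuel ih =>
    rw [pvFindCloseA]
    split
    · split
      · exact le_refl j
      · exact le_trans (Nat.le_succ j) (ih (j + 1))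
    · exact le_refl j

theorem pvFindCloseA_le (lines : List String) (fuel : Nat) (j : Nat)
    (hj : j ≤ lines.length) : pvFindCloseA lines fuel j ≤ lines.length := by
  induction fuel generalizing j with
  | zero => exact hj
  | succ fuel ih =>
    rw [pvFindCloseA]
    split
    · split
      · omega
      · exact ih (j + 1) (by omega)
    · exact hj

-- any sufficient fuel computes the same first-closing-fence index
theorem pvFindCloseA_fuel (lines : List String) (f₁ f₂ : Nat) (j : Nat)
    (h₁ : lines.length - j ≤ f₁) (h₂ : lines.length - j ≤ f₂) :
    pvFindCloseA lines f₁ j = pvFindCloseA lines f₂ j := by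
  induction f₁ generalizing f₂ j with
  | zero =>
    rw [pvFindCloseA_id lines 0 j (by omega), pvFindCloseA_id lines f₂ j (by omega)]
  | succ f₁ ih =>
    by_cases hj : j < lines.length
    · cases f₂ with
      | zero => omega
      | succ f₂ =>
        rw [pvFindCloseA, pvFindCloseA, dif_pos hj, dif_pos hj]
        split
        · rfl
        · exact ih f₂ (j + 1) (by omega) (by omega)
    · rw [pvFindCloseA_id lines _ j (by omega), pvFindCloseA_id lines f₂ j (by omega)]

-- one unfolding step of the scan at full fuel
theorem pvFindCloseA_step (lines : List String) (j : Nat) (hj : j < lines.length) :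
    pvFindCloseA lines lines.length j
      = if pvIsClose lines[j] then j else pvFindCloseA lines lines.length (j + 1) := by
  rw [pvFindCloseA_fuel lines lines.length (Nat.succ lines.length) j (by omega) (by omega)]
  rw [pvFindCloseA, dif_pos hj]

-- if no closing fence exists at or after i, A copies the remaining lines verbatim
theorem pvLoopA_no_close (tid rep : String) (lines : List String) (fuel i : Nat)
    (hfuel : lines.length - i ≤ fuel)
    (h : pvFindCloseA lines lines.length i = lines.length) (out : List String) :
    pvLoopA tid rep lines fuel i out = out ++ lines.drop i := by
  induction fuel generalizing i out with
  | zero =>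
    rw [pvLoopA, List.drop_of_length_le (by omega)]
    exact (List.append_nil out).symm
  | succ fuel ih =>
    rw [pvLoopA]
    by_cases hi : i < lines.length
    · rw [dif_pos hi]
      dsimp only
      rw [pvFindCloseA_step lines i hi] at h
      have hc : ¬ (pvIsClose lines[i] = true) := by
        intro hc; rw [if_pos hc] at h; omega
      rw [if_neg hc] at h
      have hdrop : lines.drop i = lines[i] :: lines.drop (i + 1) :=
        List.drop_eq_getElem_cons hi
      have hrec : pvLoopA tid rep lines fuel (i + 1) (out ++ [lines[i]])
          = out ++ [lines[i]] ++ lines.drop (i + 1) :=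
        ih (i + 1) (by omega) h (out ++ [lines[i]])
      by_cases ho : pvOpensTab lines[i] = true
      · rw [if_pos ho, dif_neg (by omega), hrec, hdrop]
        simp
      · rw [if_neg ho, hrec, hdrop]
        simp
    · rw [dif_neg hi, List.drop_of_length_le (by omega)]
      simp
-- characterisation of B's buffering state by the position of the first closing fence
theorem pvLoopB_some (tid rep : String) (lines : List String) (j : Nat)
    (hj : j ≤ lines.length) (buf out : List String) :
    pvLoopB tid rep (lines.drop j) (some buf) out =
      if pvFindCloseA lines lines.length j < lines.length then
        pvLoopB tid rep (lines.drop (pvFindCloseA lines lines.length j + 1)) none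
          (out ++ if PySem.Str.isIn tid (PySem.Str.join "\n"
                      (buf ++ (lines.drop j).take (pvFindCloseA lines lines.length j + 1 - j))) = true
                  then [pvRstripNL rep]
                  else buf ++ (lines.drop j).take (pvFindCloseA lines lines.length j + 1 - j))
      else out ++ buf ++ lines.drop j := by
  by_cases hlt : j < lines.length
  · have hdrop : lines.drop j = lines[j] :: lines.drop (j + 1) :=
      List.drop_eq_getElem_cons hlt
    by_cases hc : pvIsClose lines[j] = true
    · have hfc : pvFindCloseA lines lines.length j = j := by
        rw [pvFindCloseA_step lines j hlt, if_pos hc]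
      rw [hfc, if_pos hlt]
      have htake : (lines.drop j).take (j + 1 - j) = [lines[j]] := by
        rw [hdrop]
        have : j + 1 - j = 1 := by omega
        rw [this]
        rfl
      rw [htake]
      conv_lhs => rw [hdrop]
      simp only [pvLoopB, if_pos hc]
      split <;> simp
    · have hfc : pvFindCloseA lines lines.length j = pvFindCloseA lines lines.length (j + 1) := by
        rw [pvFindCloseA_step lines j hlt, if_neg hc]
      have hge : j + 1 ≤ pvFindCloseA lines lines.length (j + 1) :=
        pvFindCloseA_ge lines lines.length (j + 1)
      conv_lhs => rw [hdrop]
      simp only [pvLoopB, if_neg hc]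
      rw [pvLoopB_some tid rep lines (j + 1) (by omega) (buf ++ [lines[j]]) out, hfc]
      by_cases h1 : pvFindCloseA lines lines.length (j + 1) < lines.length
      · rw [if_pos h1, if_pos h1]
        have htake : (lines.drop j).take (pvFindCloseA lines lines.length (j + 1) + 1 - j)
            = lines[j] :: (lines.drop (j + 1)).take (pvFindCloseA lines lines.length (j + 1) + 1 - (j + 1)) := by
          rw [hdrop]
          have : pvFindCloseA lines lines.length (j + 1) + 1 - j
              = (pvFindCloseA lines lines.length (j + 1) + 1 - (j + 1)) + 1 := by omega
          rw [this, List.take_succ_cons]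
        rw [htake]
        simp
      · rw [if_neg h1, if_neg h1, hdrop]
        simp
  · have hnil : lines.drop j = [] := List.drop_of_length_le (by omega)
    have hfc : pvFindCloseA lines lines.length j = j :=
      pvFindCloseA_id lines lines.length j (by omega)
    rw [hnil, hfc, if_neg (by omega)]
    simp [pvLoopB]
termination_by lines.length - j

-- the main loop correspondence: A's cursor loop from i equals B's pass over the remaining lines
theorem pvLoopA_eq_pvLoopB (tid rep : String) (lines : List String) (fuel i : Nat)
    (hfuel : lines.length - i ≤ fuel) (out : List String) :
    pvLoopA tid rep lines fuel i out = pvLoopB tid rep (lines.drop i) none out := by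
  induction fuel generalizing i out with
  | zero =>
    rw [pvLoopA, List.drop_of_length_le (by omega)]
    rfl
  | succ fuel ih =>
    rw [pvLoopA]
    by_cases hi : i < lines.length
    · rw [dif_pos hi]
      dsimp only
      have hdrop : lines.drop i = lines[i] :: lines.drop (i + 1) :=
        List.drop_eq_getElem_cons hi
      have hge : i + 1 ≤ pvFindCloseA lines lines.length (i + 1) :=
        pvFindCloseA_ge lines lines.length (i + 1)
      by_cases ho : pvOpensTab lines[i] = true
      · rw [if_pos ho]
        conv_rhs => rw [hdrop]
        simp only [pvLoopB, if_pos ho]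
        rw [pvLoopB_some tid rep lines (i + 1) (by omega) [lines[i]] out]
        by_cases hj : pvFindCloseA lines lines.length (i + 1) < lines.length
        · rw [dif_pos hj, if_pos hj]
          have hblk : PySem.List.slice lines (some (i : Int))
                (some ((pvFindCloseA lines lines.length (i + 1) : Int) + 1))
              = [lines[i]] ++ (lines.drop (i + 1)).take
                  (pvFindCloseA lines lines.length (i + 1) + 1 - (i + 1)) := by
            have h1 : ((pvFindCloseA lines lines.length (i + 1) : Int) + 1)
                = ((pvFindCloseA lines lines.length (i + 1) + 1 : Nat) : Int) := by push_cast; ring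
            rw [h1, PySem.List.slice_natCast, List.drop_eq_getElem_cons hi]
            have h2 : pvFindCloseA lines lines.length (i + 1) + 1 - i
                = (pvFindCloseA lines lines.length (i + 1) + 1 - (i + 1)) + 1 := by omega
            rw [h2, List.take_succ_cons]
            simp
          rw [hblk]
          split
          · exact ih (pvFindCloseA lines lines.length (i + 1) + 1) (by omega)
              (out ++ [pvRstripNL rep])
          · exact ih (pvFindCloseA lines lines.length (i + 1) + 1) (by omega)
              (out ++ ([lines[i]] ++ (lines.drop (i + 1)).take
                (pvFindCloseA lines lines.length (i + 1) + 1 - (i + 1))))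
        · rw [dif_neg hj, if_neg hj]
          have hfc : pvFindCloseA lines lines.length (i + 1) = lines.length := by
            have := pvFindCloseA_le lines lines.length (i + 1) (by omega)
            omega
          rw [pvLoopA_no_close tid rep lines fuel (i + 1) (by omega) hfc]
      · rw [if_neg ho]
        conv_rhs => rw [hdrop]
        simp only [pvLoopB, if_neg ho]
        exact ih (i + 1) (by omega) (out ++ [lines[i]])
    · rw [dif_neg hi, List.drop_of_length_le (by omega)]
      rfl

-- ===== VERDICT (by name: the statement is the Claim_ definition above) =====
theorem replace_table_block_by_id_py_spec : Claim_equal_replace_table_block_by_id_py := by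
  intro content table_id replacement _
  unfold Spec_replace_table_block_by_id_py replace_table_block_by_id_py replace_table_block_by_id_py_alt
  dsimp only
  rw [pvLoopA_eq_pvLoopB _ _ _ _ 0 (by omega)]
  rfl
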